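-- pv_equiv track=rewrite | github.com/prakashtanaji/DSAndAlgo | dailycode/python/stringprobs.py | solveReduce2
-- ===== SOURCE A (Python) =====
-- def solveReduce2(s, k):
--     res = ['' for i in range(len(s))]
--     l = 0
--     r = 0
--     count = 0
--     while r < len(s):
--         if count ==0 or res[l-1] != s[r]:
--             res[l] = s[r]
--             count = 1
--             l+=1
--         else :
--             count += 1
--             if count <= k:
--                 res[l] = s[r]
--                 l+=1
--         r+=1
--     return res[:l]
-- ===== SOURCE B (Python) =====
-- def solveReduce2(s, k):
--     cap = k if k > 1 else 1
--     out = []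
--     i, n = 0, len(s)
--     while i < n:
--         j = i
--         while j < n and s[j] == s[i]:
--             j += 1
--         out.extend(s[i] * min(j - i, cap))
--         i = j
--     return out
-- ===== Notes on version B (the rewrite author's own statement) =====
-- stated objective: simpler
-- what changed: B scans maximal runs of equal characters with two indices and emits min(runlen, max(k,1)) copies per run, instead of A's preallocated result array with l/r pointers and a running duplicate counter.
import Mathlib
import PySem

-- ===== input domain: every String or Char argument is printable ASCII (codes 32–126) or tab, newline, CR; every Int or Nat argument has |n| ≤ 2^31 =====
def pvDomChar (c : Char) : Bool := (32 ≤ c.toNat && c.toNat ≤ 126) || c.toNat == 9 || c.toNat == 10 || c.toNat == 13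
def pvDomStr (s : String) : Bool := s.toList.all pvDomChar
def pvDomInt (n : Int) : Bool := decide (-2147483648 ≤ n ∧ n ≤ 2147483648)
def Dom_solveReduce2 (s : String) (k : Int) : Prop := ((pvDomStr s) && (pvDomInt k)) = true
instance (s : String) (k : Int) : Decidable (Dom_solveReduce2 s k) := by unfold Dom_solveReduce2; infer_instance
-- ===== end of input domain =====

-- B replaces A's preallocated result array with l/r pointers and a running duplicate
-- counter by a run-scanning loop emitting min(runlen, max(k,1)) copies per run (simpler).

-- ===== PORT A =====
-- A's while loop over r with state (res, l, count), transcribed as structural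
-- recursion on the remaining characters (r only ever steps to the next char).
def aGo (k : Int) (res : List String) (l count : Nat) : List Char → List String × Nat
  | [] => (res, l)
  | c :: rest =>
    let sr := String.ofList [c]
    if count = 0 ∨ (PySem.List.pyGet? res ((l : Int) - 1)).getD "" ≠ sr then
      aGo k (res.set l sr) (l + 1) 1 rest
    else if ((count : Int) + 1) ≤ k then
      aGo k (res.set l sr) (l + 1) (count + 1) rest
    else
      aGo k res l (count + 1) rest

def solveReduce2 (s : String) (k : Int) : List String :=
  let cs := s.toList
  let p := aGo k (List.replicate cs.length "") 0 0 cs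
  p.1.take p.2

-- ===== PORT B =====
-- Source B: cap = k if k > 1 else 1
def capOf (k : Int) : Nat := if 1 < k then k.toNat else 1

-- Source B's outer while loop: each step consumes one maximal run (the inner j-scan
-- is the takeWhile/dropWhile split) and extends out with min(runlen, cap) copies.
def bGo (k : Int) : List Char → List String
  | [] => []
  | c :: rest =>
    let run := rest.takeWhile (· == c)
    List.replicate (min (run.length + 1) (capOf k)) (String.ofList [c])
      ++ bGo k (rest.dropWhile (· == c))
termination_by cs => cs.length
decreasing_by
  simpa using Nat.lt_succ_of_le (List.length_dropWhile_le _ _)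

def solveReduce2_alt (s : String) (k : Int) : List String :=
  bGo k s.toList

-- ===== PRECONDITION & SPEC =====
def Spec_solveReduce2 (s : String) (k : Int) (out : List String) : Prop := out = solveReduce2_alt s k
instance (s : String) (k : Int) (out : List String) : Decidable (Spec_solveReduce2 s k out) := by unfold Spec_solveReduce2; infer_instance

-- ===== CLAIM (what is proved, stated in full; the proofs are below) =====
def Claim_equal_solveReduce2 : Prop := ∀ (s : String) (k : Int), Dom_solveReduce2 s k → Spec_solveReduce2 s k (solveReduce2 s k)

-- ===== LEMMAS AND PROOFS =====

-- Continuation of A's loop while inside a run of char c with `count` occurrences seen.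
def contC (k : Int) (c : Char) (count : Nat) : List Char → List String
  | [] => []
  | d :: rest =>
    if d = c then
      (if count + 1 ≤ capOf k then [String.ofList [c]] else []) ++ contC k c (count + 1) rest
    else
      String.ofList [d] :: contC k d 1 rest

theorem keep_iff (k : Int) (count : Nat) (h : 1 ≤ count) :
    (((count : Int) + 1) ≤ k) = (count + 1 ≤ capOf k) := by
  unfold capOf
  split_ifs with h1 <;> simp <;> omega

theorem take_set (res : List String) (l : Nat) (x : String) (h : l < res.length) :
    (res.set l x).take (l + 1) = res.take l ++ [x] := by
  rw [List.take_add_one]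
  simp [List.getElem?_set_self h, List.take_set]
  exact List.set_eq_of_length_le (by simp)

theorem aGo_contC (k : Int) : ∀ (rest : List Char) (res : List String) (l count : Nat)
    (c : Char), 1 ≤ count → 1 ≤ l → l + rest.length ≤ res.length →
    (PySem.List.pyGet? res ((l : Int) - 1)).getD "" = String.ofList [c] →
    (aGo k res l count rest).1.take (aGo k res l count rest).2
      = res.take l ++ contC k c count rest := by
  intro rest
  induction rest with
  | nil => intro res l count c _ _ _ _; simp [aGo, contC]
  | cons d rest ih =>
    intro res l count c hc hl hlen hget
    have hlt : l < res.length := by simp at hlen; omega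
    have hmk : (String.ofList [c] = String.ofList [d]) ↔ c = d := by
      constructor
      · intro h; have := congrArg String.toList h; simpa using this
      · intro h; rw [h]
    by_cases hcd : d = c
    · -- same char: A's `or` condition is false
      subst hcd
      have hcond : ¬ (count = 0 ∨ (PySem.List.pyGet? res ((l : Int) - 1)).getD "" ≠ String.ofList [d]) := by
        simp [hget]; omega
      by_cases hk : ((count : Int) + 1) ≤ k
      · have hcap : count + 1 ≤ capOf k := by
          have := keep_iff k count hc; rw [← this]; exact hk
        have hget' : (PySem.List.pyGet? (res.set l (String.ofList [d])) (((l : Nat) + 1 : Nat) - 1)).getD ""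
            = String.ofList [d] := by
          push_cast
          rw [show ((l : Int) + 1 - 1) = (l : Nat) by push_cast; ring]
          rw [PySem.List.pyGet?_natCast]
          simp [List.getElem?_set_self, hlt]
        have := ih (res.set l (String.ofList [d])) (l + 1) (count + 1) d (by omega) (by omega)
          (by simp at hlen ⊢; omega) (by exact_mod_cast hget')
        simp only [aGo, hcond, if_false, if_pos hk, ite_false] at *
        rw [this, take_set res l _ hlt, contC]
        simp [hcap]
      · have := ih res l (count + 1) d (by omega) hl (by simp at hlen ⊢; omega) hget
        have hcap : ¬ (count + 1 ≤ capOf k) := by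
          have := keep_iff k count hc; rw [← this]; exact hk
        simp only [aGo, hcond, if_false, if_pos, ite_false, if_neg hk] at *
        rw [this, contC]
        simp [hcap]
    · -- different char: new run starts
      have hcond : (count = 0 ∨ (PySem.List.pyGet? res ((l : Int) - 1)).getD "" ≠ String.ofList [d]) := by
        right; rw [hget]; intro h; exact hcd ((hmk.mp h).symm)
      have hget' : (PySem.List.pyGet? (res.set l (String.ofList [d])) (((l : Nat) + 1 : Nat) - 1)).getD ""
          = String.ofList [d] := by
        push_cast
        rw [show ((l : Int) + 1 - 1) = (l : Nat) by push_cast; ring]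
        rw [PySem.List.pyGet?_natCast]
        simp [List.getElem?_set_self, hlt]
      have := ih (res.set l (String.ofList [d])) (l + 1) 1 d (by omega) (by omega)
        (by simp at hlen ⊢; omega) (by exact_mod_cast hget')
      simp only [aGo, hcond, if_pos] at *
      rw [this, take_set res l _ hlt, contC, if_neg hcd]
      simp

theorem cap_pos (k : Int) : 1 ≤ capOf k := by
  unfold capOf; split_ifs with h <;> omega

theorem contC_bGo (k : Int) : ∀ (rest : List Char) (c : Char) (count : Nat), 1 ≤ count →
    contC k c count rest
      = List.replicate (min (count + (rest.takeWhile (· == c)).length) (capOf k)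
          - min count (capOf k)) (String.ofList [c])
        ++ bGo k (rest.dropWhile (· == c)) := by
  intro rest
  induction rest with
  | nil => intro c count _; simp [contC, bGo]
  | cons d rest ih =>
    intro c count hc
    by_cases hcd : d = c
    · subst hcd
      rw [contC, if_pos rfl, ih d (count + 1) (by omega)]
      rw [List.takeWhile_cons_of_pos (by simp), List.dropWhile_cons_of_pos (by simp)]
      simp only [List.length_cons]
      by_cases hcap : count + 1 ≤ capOf k
      · rw [if_pos hcap]
        rw [show min (count + ((rest.takeWhile (· == d)).length + 1)) (capOf k) - min count (capOf k)
            = 1 + (min (count + 1 + (rest.takeWhile (· == d)).length) (capOf k) - min (count + 1) (capOf k)) by omega]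
        simp [List.replicate_add]
      · rw [if_neg hcap]
        rw [show min (count + ((rest.takeWhile (· == d)).length + 1)) (capOf k) - min count (capOf k)
            = min (count + 1 + (rest.takeWhile (· == d)).length) (capOf k) - min (count + 1) (capOf k) by omega]
        simp
    · rw [contC, if_neg hcd, ih d 1 (by omega)]
      rw [List.takeWhile_cons_of_neg (by simp [hcd]), List.dropWhile_cons_of_neg (by simp [hcd])]
      have hcp := cap_pos k
      simp only [bGo, List.length_nil, Nat.add_zero, Nat.min_self, Nat.sub_self,
        List.replicate_zero, List.nil_append]
      rw [show min ((rest.takeWhile (· == d)).length + 1) (capOf k)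
          = 1 + (min (1 + (rest.takeWhile (· == d)).length) (capOf k) - min 1 (capOf k)) from by omega]
      simp [List.replicate_add]

-- ===== VERDICT (by name: the statement is the Claim_ definition above) =====
theorem solveReduce2_spec : Claim_equal_solveReduce2 := by
  intro s k _
  unfold Spec_solveReduce2 solveReduce2 solveReduce2_alt
  cases hs : s.toList with
  | nil => simp [aGo, bGo]
  | cons c rest =>
    have hcond : ((0 : Nat) = 0 ∨ True) := Or.inl rfl
    simp only [aGo, List.length_cons, true_or, if_true, Nat.zero_add, eq_self_iff_true]
    have hget : (PySem.List.pyGet?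
        ((List.replicate (rest.length + 1) "").set 0 (String.ofList [c])) (((1 : Nat) : Int) - 1)).getD ""
        = String.ofList [c] := by
      norm_num [PySem.List.pyGet?_zero]
    rw [aGo_contC k rest _ 1 1 c (by omega) (by omega) (by simp only [List.length_set, List.length_replicate]; omega) hget]
    rw [contC_bGo k rest c 1 (by omega), bGo]
    have hcp := cap_pos k
    rw [take_set _ 0 _ (by simp)]
    rw [show min ((rest.takeWhile (· == c)).length + 1) (capOf k)
        = 1 + (min (1 + (rest.takeWhile (· == c)).length) (capOf k) - min 1 (capOf k)) by omega]
    simp [List.replicate_add]
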